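-- pv_equiv track=rewrite | github.com/lujain-khalil/caltech | summary.py | build_ablation_sets
-- ===== SOURCE A (Python) =====
-- from collections import defaultdict
--
-- def build_ablation_sets(raw_data):
--     """
--     Group experiments into ablation sets dynamically based on name prefix.
--
--     Convention:
--         - Experiments are named like 'A_slo_100', 'B_net_moderate', 'E_new_thing', etc.
--         - The token before the first underscore is treated as the ablation set ID.
--         - Experiments without an underscore are grouped into a 'misc' set.
--         - If a 'default' experiment exists, it is added as '<SET>_baseline' to every set.
--     """
--     ablation_sets = defaultdict(dict)
--
--     for exp_name, data in raw_data.items():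
--         if exp_name == "default":
--             continue
--
--         if "_" in exp_name:
--             set_name = exp_name.split("_", 1)[0]
--         else:
--             set_name = "misc"
--
--         ablation_sets[set_name][exp_name] = data
--
--     # Optionally add the default/baseline run to each set
--     if "default" in raw_data:
--         baseline_data = raw_data["default"]
--         for set_name in ablation_sets.keys():
--             baseline_name = f"{set_name}_baseline"
--             if baseline_name not in ablation_sets[set_name]:
--                 ablation_sets[set_name][baseline_name] = baseline_data
--
--     return dict(ablation_sets)
-- ===== SOURCE B (Python) =====
-- def build_ablation_sets(raw_data):
--     """Group experiments into ablation sets by name prefix.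
--
--     Different decomposition from the original: instead of one streaming pass
--     inserting into a defaultdict followed by a second baseline pass, compute
--     the ordered list of set names first (first appearance), then build each
--     set's dict independently by a grouped comprehension, adding the baseline
--     entry inline.
--     """
--     def prefix_of(name):
--         return name.split("_", 1)[0] if "_" in name else "misc"
--
--     items = [(n, d) for n, d in raw_data.items() if n != "default"]
--     order = list(dict.fromkeys(prefix_of(n) for n, _ in items))
--     result = {}
--     for p in order:
--         group = {n: d for n, d in items if prefix_of(n) == p}
--         if "default" in raw_data and f"{p}_baseline" not in group:
--             group[f"{p}_baseline"] = raw_data["default"]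
--         result[p] = group
--     return result
-- ===== Notes on version B (the rewrite author's own statement) =====
-- stated objective: alternative
-- what changed: Replaced the streaming defaultdict pass plus separate baseline-mutation pass by a staged decomposition: dedup the prefix order first, then build each set's dict independently by a grouped filter with the baseline added inline.
import Mathlib
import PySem

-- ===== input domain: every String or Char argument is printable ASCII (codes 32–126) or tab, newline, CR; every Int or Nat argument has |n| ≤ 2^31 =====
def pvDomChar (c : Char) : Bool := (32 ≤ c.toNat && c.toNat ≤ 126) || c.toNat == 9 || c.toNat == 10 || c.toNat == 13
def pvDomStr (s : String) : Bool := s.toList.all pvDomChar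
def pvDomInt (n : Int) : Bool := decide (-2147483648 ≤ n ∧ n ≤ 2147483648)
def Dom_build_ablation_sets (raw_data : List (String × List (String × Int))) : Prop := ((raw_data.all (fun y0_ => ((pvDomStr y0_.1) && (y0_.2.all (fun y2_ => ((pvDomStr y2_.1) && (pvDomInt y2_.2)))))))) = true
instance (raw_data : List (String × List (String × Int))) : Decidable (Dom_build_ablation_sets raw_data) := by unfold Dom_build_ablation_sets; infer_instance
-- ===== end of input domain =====

-- B replaces A's streaming defaultdict pass + second baseline-mutation pass by a staged
-- decomposition (dedup the prefix order, then build each group independently); alternative, not faster.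

-- ===== PORT A =====
-- exp_name.split("_", 1)[0]; the match is exact: sep ≠ "" so splitMax? is some, and split never returns []
def pvSplitHead (s : String) : String :=
  match PySem.Str.splitMax? s "_" 1 with
  | some (p :: _) => p
  | _ => ""

def build_ablation_sets (raw_data : List (String × List (String × Int))) :
    List (String × List (String × List (String × Int))) :=
  let ablation_sets : PySem.Dict String (PySem.Dict String (List (String × Int))) :=
    raw_data.foldl (fun abl x =>
      if x.1 == "default" then abl
      else
        let set_name := if PySem.Str.isIn "_" x.1 then pvSplitHead x.1 else "misc"
        -- ablation_sets[set_name][exp_name] = data  (defaultdict(dict))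
        abl.insert set_name ((abl.getD set_name PySem.Dict.empty).insert x.1 x.2))
      PySem.Dict.empty
  let ablation_sets :=
    if (PySem.Dict.mk raw_data).contains "default" then
      let baseline_data := (PySem.Dict.mk raw_data).getD "default" []
      ablation_sets.keys.foldl (fun d set_name =>
        let baseline_name := set_name ++ "_baseline"
        if (d.getD set_name PySem.Dict.empty).contains baseline_name then d
        else d.insert set_name ((d.getD set_name PySem.Dict.empty).insert baseline_name baseline_data))
        ablation_sets
    else ablation_sets
  ablation_sets.items.map (fun q => (q.1, q.2.items))

-- ===== PORT B =====
def prefix_of (name : String) : String :=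
  if PySem.Str.isIn "_" name then pvSplitHead name else "misc"

def build_ablation_sets_alt (raw_data : List (String × List (String × Int))) :
    List (String × List (String × List (String × Int))) :=
  let items := raw_data.filter (fun x => x.1 != "default")
  let order := PySem.List.dedup (items.map (fun x => prefix_of x.1))
  order.map (fun p =>
    let group : PySem.Dict String (List (String × Int)) :=
      (items.filter (fun x => prefix_of x.1 == p)).foldl
        (fun g x => g.insert x.1 x.2) PySem.Dict.empty
    let group :=
      if (PySem.Dict.mk raw_data).contains "default" && !group.contains (p ++ "_baseline") then
        group.insert (p ++ "_baseline") ((PySem.Dict.mk raw_data).getD "default" [])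
      else group
    (p, group.items))

-- ===== PRECONDITION & SPEC =====
def Spec_build_ablation_sets (raw_data : List (String × List (String × Int))) (out : List (String × List (String × List (String × Int)))) : Prop := out = build_ablation_sets_alt raw_data
instance (raw_data : List (String × List (String × Int))) (out : List (String × List (String × List (String × Int)))) : Decidable (Spec_build_ablation_sets raw_data out) := by unfold Spec_build_ablation_sets; infer_instance

-- ===== CLAIM (what is proved, stated in full; the proofs are below) =====
def Claim_equal_build_ablation_sets : Prop := ∀ (raw_data : List (String × List (String × Int))), Dom_build_ablation_sets raw_data → Spec_build_ablation_sets raw_data (build_ablation_sets raw_data)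

-- ===== LEMMAS AND PROOFS =====

-- abbreviations used only by the proofs
def pvStep (abl : PySem.Dict String (PySem.Dict String (List (String × Int))))
    (x : String × List (String × Int)) : PySem.Dict String (PySem.Dict String (List (String × Int))) :=
  abl.insert (prefix_of x.1) ((abl.getD (prefix_of x.1) PySem.Dict.empty).insert x.1 x.2)

def pvExt (g : PySem.Dict String (List (String × Int))) (l : List (String × List (String × Int))) :
    PySem.Dict String (List (String × Int)) :=
  l.foldl (fun g x => g.insert x.1 x.2) g

-- value of the grouping fold at any key
theorem pvStep_getD (l : List (String × List (String × Int)))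
    (g : PySem.Dict String (PySem.Dict String (List (String × Int)))) (k : String) :
    (l.foldl pvStep g).getD k PySem.Dict.empty
      = pvExt (g.getD k PySem.Dict.empty) (l.filter (fun x => prefix_of x.1 == k)) := by
  induction l generalizing g with
  | nil => simp [pvExt]
  | cons x t ih =>
    simp only [List.foldl_cons, List.filter_cons]
    rw [ih]
    by_cases h : prefix_of x.1 = k
    · subst h
      simp [pvStep, PySem.Dict.getD_insert_self, pvExt]
    · have : (prefix_of x.1 == k) = false := by simpa using h
      simp only [this, Bool.false_eq_true, if_false]
      congr 1
      simp [pvStep, PySem.Dict.getD_insert, Ne.symm h]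


-- keys of the grouping fold: first-appearance dedup of the prefixes
theorem pvStep_keys (l : List (String × List (String × Int))) :
    (l.foldl pvStep PySem.Dict.empty).keys = PySem.List.dedup (l.map (fun x => prefix_of x.1)) := by
  rw [PySem.List.dedup_eq_ofList]
  exact PySem.Dict.keys_foldl_insert_key l (fun x => prefix_of x.1)
    (fun d x => (d.getD (prefix_of x.1) PySem.Dict.empty).insert x.1 x.2) PySem.Dict.empty

theorem pvStep_nodup (l : List (String × List (String × Int))) :
    (l.foldl pvStep PySem.Dict.empty).keys.Nodup :=
  PySem.Dict.nodup_keys_foldl_insert_key l (fun x => prefix_of x.1)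
    (fun d x => (d.getD (prefix_of x.1) PySem.Dict.empty).insert x.1 x.2) PySem.Dict.empty
    PySem.Dict.nodup_keys_empty

-- the baseline pass
def pvBStep (base : List (String × Int))
    (d : PySem.Dict String (PySem.Dict String (List (String × Int)))) (p : String) :
    PySem.Dict String (PySem.Dict String (List (String × Int))) :=
  if (d.getD p PySem.Dict.empty).contains (p ++ "_baseline") then d
  else d.insert p ((d.getD p PySem.Dict.empty).insert (p ++ "_baseline") base)

def pvBl (base : List (String × Int)) (g : PySem.Dict String (List (String × Int))) (p : String) :
    PySem.Dict String (List (String × Int)) :=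
  if g.contains (p ++ "_baseline") then g else g.insert (p ++ "_baseline") base

theorem pvBStep_getD (base : List (String × Int))
    (d : PySem.Dict String (PySem.Dict String (List (String × Int)))) (p k : String) :
    (pvBStep base d p).getD k PySem.Dict.empty
      = if k = p then pvBl base (d.getD p PySem.Dict.empty) p else d.getD k PySem.Dict.empty := by
  unfold pvBStep pvBl
  split_ifs with hc hk hk
  · subst hk; rfl
  · rfl
  · subst hk; simp
  · simp [PySem.Dict.getD_insert, hk]

theorem pvBStep_keys (base : List (String × Int)) (ks : List String)
    (d : PySem.Dict String (PySem.Dict String (List (String × Int))))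
    (hks : ∀ p ∈ ks, p ∈ d.keys) :
    (ks.foldl (pvBStep base) d).keys = d.keys := by
  induction ks generalizing d with
  | nil => rfl
  | cons p t ih =>
    have hp : p ∈ d.keys := hks p (List.mem_cons_self ..)
    have hstep : (pvBStep base d p).keys = d.keys := by
      unfold pvBStep
      split_ifs with hc
      · rfl
      · exact PySem.Dict.keys_insert_of_contains _ _ ((PySem.Dict.contains_iff_mem_keys _ _).2 hp)
    simp only [List.foldl_cons]
    rw [ih _ (fun q hq => by rw [hstep]; exact hks q (List.mem_cons_of_mem _ hq)), hstep]

theorem pvBFold_getD (base : List (String × Int)) (ks : List String) (hnd : ks.Nodup)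
    (d : PySem.Dict String (PySem.Dict String (List (String × Int)))) (k : String) :
    (ks.foldl (pvBStep base) d).getD k PySem.Dict.empty
      = if k ∈ ks then pvBl base (d.getD k PySem.Dict.empty) k else d.getD k PySem.Dict.empty := by
  induction ks generalizing d with
  | nil => simp
  | cons p t ih =>
    obtain ⟨hpt, hndt⟩ := List.nodup_cons.1 hnd
    simp only [List.foldl_cons]
    rw [ih hndt, pvBStep_getD]
    by_cases hk : k = p
    · subst hk
      simp [hpt]
    · by_cases hkt : k ∈ t <;> simp [hk, hkt]


-- common canonical form both ports reduce to
def pvCanon (raw : List (String × List (String × Int))) :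
    List (String × List (String × List (String × Int))) :=
  (PySem.List.dedup ((raw.filter (fun x => x.1 != "default")).map (fun x => prefix_of x.1))).map
    (fun p =>
      (p, (if (PySem.Dict.mk raw).contains "default"
           then pvBl ((PySem.Dict.mk raw).getD "default" [])
                  (pvExt PySem.Dict.empty
                    ((raw.filter (fun x => x.1 != "default")).filter (fun x => prefix_of x.1 == p))) p
           else pvExt PySem.Dict.empty
                  ((raw.filter (fun x => x.1 != "default")).filter (fun x => prefix_of x.1 == p))).items))

theorem pvBl_eq (c : Bool) (g : PySem.Dict String (List (String × Int))) (p : String)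
    (base : List (String × Int)) :
    (if c && !g.contains (p ++ "_baseline") then g.insert (p ++ "_baseline") base else g)
      = (if c then pvBl base g p else g) := by
  cases c <;> cases h : g.contains (p ++ "_baseline") <;> simp [pvBl, h]

theorem pvB_canon (raw : List (String × List (String × Int))) :
    build_ablation_sets_alt raw = pvCanon raw := by
  unfold build_ablation_sets_alt pvCanon
  refine List.map_congr_left (fun p _ => ?_)
  simp only [pvExt]
  rw [pvBl_eq]

theorem pvA_canon (raw : List (String × List (String × Int))) :
    build_ablation_sets raw = pvCanon raw := by
  have h1 : raw.foldl (fun abl x => if x.1 == "default" then abl else pvStep abl x) PySem.Dict.empty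
      = (raw.filter (fun x => x.1 != "default")).foldl pvStep PySem.Dict.empty := by
    rw [← PySem.List.foldl_if_eq_foldl_filter (fun x => x.1 != "default") pvStep raw PySem.Dict.empty]
    exact PySem.List.foldl_congr_mem _ _ _ _ (fun acc x _ => by by_cases h : x.1 = "default" <;> simp [h])
  show ((if (PySem.Dict.mk raw).contains "default" then
          (raw.foldl (fun abl x => if x.1 == "default" then abl else pvStep abl x) PySem.Dict.empty).keys.foldl
            (pvBStep ((PySem.Dict.mk raw).getD "default" []))
            (raw.foldl (fun abl x => if x.1 == "default" then abl else pvStep abl x) PySem.Dict.empty)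
        else raw.foldl (fun abl x => if x.1 == "default" then abl else pvStep abl x) PySem.Dict.empty).items.map
          (fun q => (q.1, q.2.items))) = pvCanon raw
  rw [h1]
  set items := raw.filter (fun x => x.1 != "default") with hit
  set D := items.foldl pvStep PySem.Dict.empty with hD
  have hnd : D.keys.Nodup := pvStep_nodup items
  have hkeys : D.keys = PySem.List.dedup (items.map (fun x => prefix_of x.1)) := pvStep_keys items
  have hget : ∀ k, D.getD k PySem.Dict.empty
      = pvExt PySem.Dict.empty (items.filter (fun x => prefix_of x.1 == k)) := by
    intro k
    rw [hD, pvStep_getD]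
    simp
  cases hdef : (PySem.Dict.mk raw).contains "default"
  · simp only [Bool.false_eq_true, if_false]
    unfold pvCanon
    rw [PySem.Dict.items_eq_map_keys D hnd PySem.Dict.empty, List.map_map, hkeys]
    simp only [hdef, Bool.false_eq_true, if_false, ← hit]
    exact List.map_congr_left (fun p _ => by simp [hget p])
  · simp only [if_true]
    set base := (PySem.Dict.mk raw).getD "default" [] with hbase
    set D2 := D.keys.foldl (pvBStep base) D with hD2
    have hk2 : D2.keys = D.keys := pvBStep_keys base D.keys D (fun _ h => h)
    have hnd2 : D2.keys.Nodup := hk2 ▸ hnd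
    rw [PySem.Dict.items_eq_map_keys D2 hnd2 PySem.Dict.empty, List.map_map, hk2, hkeys]
    unfold pvCanon
    simp only [hdef, if_true, ← hit, ← hbase]
    refine List.map_congr_left (fun p hp => ?_)
    have hpk : p ∈ D.keys := by rw [hkeys]; exact hp
    have : D2.getD p PySem.Dict.empty = pvBl base (D.getD p PySem.Dict.empty) p := by
      rw [hD2, pvBFold_getD base D.keys hnd D p, if_pos hpk]
    simp [this, hget p]

theorem build_ablation_sets_spec : Claim_equal_build_ablation_sets := by
  intro raw _
  show build_ablation_sets raw = build_ablation_sets_alt raw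
  rw [pvA_canon, pvB_canon]
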